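-- pv_equiv track=rewrite | github.com/NsanDev/MasterProject | Maths/PiecewiseFlat.py | piecewise_flat
-- ===== SOURCE A (Python) =====
-- from bisect import bisect_left
--
-- def piecewise_flat(t,p,times):
--     assert (len(times)==len(p))
--     assert (t<=times[-1]) #last element should be higher than t
--     assert (all(times[i]<times[i+1] for i in range(0,len(times)-1)))
--     if t < times[0]:
--         return p[0]
--     else:
--         return p[bisect_left(times,t)]
-- ===== SOURCE B (Python) =====
-- def piecewise_flat(t, p, times):
--     assert (len(times) == len(p))
--     assert (t <= times[-1])  # last element should be higher than t
--     assert (all(times[i] < times[i + 1] for i in range(0, len(times) - 1)))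
--     for v, x in zip(p, times):
--         if x >= t:
--             return v
-- ===== Notes on version B (the rewrite author's own statement) =====
-- stated objective: simpler
-- what changed: replaces the bisect_left binary search and the special t<times[0] branch by a single linear forward scan over zip(p,times) that returns the first value whose time is >= t
import Mathlib
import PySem

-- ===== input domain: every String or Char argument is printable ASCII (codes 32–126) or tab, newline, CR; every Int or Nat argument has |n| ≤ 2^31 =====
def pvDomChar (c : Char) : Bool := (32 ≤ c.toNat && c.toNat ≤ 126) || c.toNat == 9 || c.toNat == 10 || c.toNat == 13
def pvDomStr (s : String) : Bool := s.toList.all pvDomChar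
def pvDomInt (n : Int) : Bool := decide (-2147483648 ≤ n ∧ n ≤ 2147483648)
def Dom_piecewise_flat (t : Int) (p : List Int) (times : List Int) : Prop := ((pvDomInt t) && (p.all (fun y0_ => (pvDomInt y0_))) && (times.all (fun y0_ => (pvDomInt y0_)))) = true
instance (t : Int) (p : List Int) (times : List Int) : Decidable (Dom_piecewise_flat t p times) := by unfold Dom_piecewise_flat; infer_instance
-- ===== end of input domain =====

-- ===== PORT A =====
-- B replaces A's bisect_left binary search by a linear forward scan over zip(p,times) (simpler).
-- bisect_left(a, x) ported step for step: while lo < hi: mid=(lo+hi)//2; if a[mid]<x: lo=mid+1 else hi=mid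
def pvBisectLeft (a : List Int) (x : Int) (lo hi : Nat) : Nat :=
  if lo < hi then
    let mid := (lo + hi) / 2
    if a.getD mid 0 < x then pvBisectLeft a x (mid + 1) hi
    else pvBisectLeft a x lo mid
  else lo
termination_by hi - lo
decreasing_by all_goals omega

def piecewise_flat (t : Int) (p : List Int) (times : List Int) : Int :=
  -- the three asserts raise outside Pre_piecewise_flat; inside Pre_ all indexing is in range
  if t < times.getD 0 0 then p.getD 0 0
  else p.getD (pvBisectLeft times t 0 times.length) 0

-- ===== PORT B =====
-- for v, x in zip(p, times): if x >= t: return v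
def piecewise_flat_alt (t : Int) (p : List Int) (times : List Int) : Int :=
  match p, times with
  | v :: ps, x :: ts => if x ≥ t then v else piecewise_flat_alt t ps ts
  | _, _ => 0  -- unreachable under Pre_ (the loop always returns); asserts raise outside Pre_

-- ===== PRECONDITION & SPEC =====
-- Pre_ = exactly the inputs on which A's three asserts pass (times nonempty with t ≤ its last
-- element, strictly increasing, and len(times)==len(p)); elsewhere A raises AssertionError/IndexError.
def Pre_piecewise_flat (t : Int) (p : List Int) (times : List Int) : Prop :=
  times.length = p.length ∧ times ≠ [] ∧ t ≤ times.getD (times.length - 1) 0 ∧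
    List.Pairwise (· < ·) times
instance (t : Int) (p : List Int) (times : List Int) : Decidable (Pre_piecewise_flat t p times) := by
  unfold Pre_piecewise_flat; infer_instance

def pvWitness_piecewise_flat : Int × List Int × List Int := (3, [10, 20, 30], [1, 4, 7])

def Spec_piecewise_flat (t : Int) (p : List Int) (times : List Int) (out : Int) : Prop := out = piecewise_flat_alt t p times
instance (t : Int) (p : List Int) (times : List Int) (out : Int) : Decidable (Spec_piecewise_flat t p times out) := by unfold Spec_piecewise_flat; infer_instance

-- ===== CLAIM (what is proved, stated in full; the proofs are below) =====
def Claim_equal_piecewise_flat : Prop := ∀ (t : Int) (p : List Int) (times : List Int), Dom_piecewise_flat t p times → Pre_piecewise_flat t p times → Spec_piecewise_flat t p times (piecewise_flat t p times)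

-- ===== LEMMAS AND PROOFS =====

-- if p holds at index i, the first index satisfying p is ≤ i
theorem my_findIdx_le (p : Int → Bool) : ∀ (l : List Int) (i : Nat) (h : i < l.length), p l[i] → l.findIdx p ≤ i := by
  intro l
  induction l with
  | nil => intro i h; simp at h
  | cons a l ih =>
    intro i h hp
    rw [List.findIdx_cons]
    cases i with
    | zero => simp at hp; simp [hp]
    | succ n =>
      by_cases ha : p a
      · simp [ha]
      · simp only [ha, cond_false]
        have := ih n (by simpa using h) (by simpa using hp)
        omega

-- B's scan returns p !! (first index of times with t ≤ ·)
theorem scan_eq_findIdx (t : Int) : ∀ (p times : List Int),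
    times.length = p.length → times.findIdx (fun x => decide (t ≤ x)) < times.length →
    piecewise_flat_alt t p times = p.getD (times.findIdx (fun x => decide (t ≤ x))) 0 := by
  intro p
  induction p with
  | nil => intro times h hlt; simp_all
  | cons v ps ih =>
    intro times h hlt
    cases times with
    | nil => simp at hlt
    | cons x ts =>
      simp only [List.findIdx_cons] at hlt ⊢
      by_cases hx : t ≤ x
      · simp [piecewise_flat_alt, hx]
      · have hx' : ¬ x ≥ t := hx
        simp only [hx, decide_false, cond_false] at hlt ⊢
        simp only [piecewise_flat_alt, if_neg hx']
        have := ih ts (by simpa using h) (by simpa using hlt)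
        simpa using this

-- A's binary search finds the same first index, given monotone access and bracketing
theorem bisect_eq_findIdx (times : List Int) (t : Int)
    (hs : List.Pairwise (· < ·) times) :
    ∀ lo hi, hi ≤ times.length →
    lo ≤ times.findIdx (fun x => decide (t ≤ x)) →
    times.findIdx (fun x => decide (t ≤ x)) ≤ hi →
    pvBisectLeft times t lo hi = times.findIdx (fun x => decide (t ≤ x)) := by
  intro lo hi
  induction lo, hi using pvBisectLeft.induct times t with
  | case1 lo hi hlt mid ha ih =>
    intro hhi hlo hj
    rw [pvBisectLeft, if_pos hlt]
    simp only [mid] at *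
    rw [if_pos ha]
    apply ih hhi _ hj
    -- times[mid] < t, so findIdx > mid
    by_contra hc
    push Not at hc
    set j := times.findIdx (fun x => decide (t ≤ x)) with hjdef
    have hjlt : j < times.length := by omega
    have hmlt : (lo + hi) / 2 < times.length := by omega
    have hpj : t ≤ times[j] := by
      have := List.findIdx_getElem (w := hjlt)
      simpa using this
    have hle : times[j] ≤ times[(lo + hi) / 2] := by
      rcases Nat.lt_or_ge j ((lo + hi) / 2) with hl | hg
      · exact le_of_lt ((List.pairwise_iff_getElem.mp hs) j ((lo + hi) / 2) hjlt hmlt hl)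
      · have : j = (lo + hi) / 2 := by omega
        simp [this]
    have : times.getD ((lo + hi) / 2) 0 = times[(lo + hi) / 2] := List.getD_eq_getElem _ _ hmlt
    rw [this] at ha
    omega
  | case2 lo hi hlt mid ha ih =>
    intro hhi hlo hj
    rw [pvBisectLeft, if_pos hlt]
    simp only [mid] at *
    rw [if_neg ha]
    apply ih (by omega) hlo
    -- t ≤ times[mid], so findIdx ≤ mid
    have hmlt : (lo + hi) / 2 < times.length := by omega
    have : times.getD ((lo + hi) / 2) 0 = times[(lo + hi) / 2] := List.getD_eq_getElem _ _ hmlt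
    rw [this] at ha
    exact my_findIdx_le _ times ((lo + hi) / 2) hmlt (by simp; omega)
  | case3 lo hi hge =>
    intro hhi hlo hj
    rw [pvBisectLeft, if_neg hge]
    omega

theorem findIdx_lt_of_pre (t : Int) (times : List Int) (hne : times ≠ [])
    (hlast : t ≤ times.getD (times.length - 1) 0) :
    times.findIdx (fun x => decide (t ≤ x)) < times.length := by
  have hlen : 0 < times.length := List.length_pos_iff.mpr hne
  have hl : times.length - 1 < times.length := by omega
  rw [List.getD_eq_getElem _ _ hl] at hlast
  apply List.findIdx_lt_length_of_exists
  exact ⟨times[times.length - 1], List.getElem_mem hl, by simpa using hlast⟩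

-- ===== VERDICT (by name: the statement is the Claim_ definition above) =====
theorem piecewise_flat_spec : Claim_equal_piecewise_flat := by
  intro t p times _ hpre
  obtain ⟨hlen, hne, hlast, hsort⟩ := hpre
  unfold Spec_piecewise_flat
  have hjlt := findIdx_lt_of_pre t times hne hlast
  have hB := scan_eq_findIdx t p times hlen hjlt
  unfold piecewise_flat
  by_cases h0 : t < times.getD 0 0
  · rw [if_pos h0, hB]
    have hlen0 : 0 < times.length := List.length_pos_iff.mpr hne
    have : times.findIdx (fun x => decide (t ≤ x)) = 0 := by
      have := my_findIdx_le (fun x => decide (t ≤ x)) times 0 hlen0 (by rw [List.getD_eq_getElem _ _ hlen0] at h0; show decide (t ≤ times[0]) = true; exact decide_eq_true (le_of_lt h0))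
      omega
    rw [this]
  · rw [if_neg h0, hB, bisect_eq_findIdx times t hsort 0 times.length le_rfl (Nat.zero_le _) (le_of_lt hjlt)]
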